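-- pv_equiv track=rewrite | github.com/krivolapov/Probability_and_Statistics | HW_2.py | union_of_products
-- ===== SOURCE A (Python) =====
-- from itertools import product
--
-- def union_of_products(A, B, S, T):
--     AxS = set()
--     AxT = set()
--     BxS = set()
--     BxT = set()
--     for i in product(A, S):
--         AxS.add((i))
--     for i in product(A, T):
--         AxT.add((i))
--     for i in product(B, S):
--         BxS.add((i))
--     for i in product(B, T):
--         BxT.add((i))
--     return (AxS, AxS|AxT|BxS|BxT)
-- ===== SOURCE B (Python) =====
-- from itertools import product, chain
--
-- def union_of_products(A, B, S, T):
--     # Disjointify the factors first: distinct A and S, then B minus A and T minus S.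
--     # The four products over these blocks are pairwise disjoint and duplicate-free,
--     # so the union is just their disjoint concatenation - no pair-level deduplication.
--     setA, setS = set(A), set(S)
--     A1 = list(dict.fromkeys(A))
--     S1 = list(dict.fromkeys(S))
--     B1 = [b for b in dict.fromkeys(B) if b not in setA]
--     T1 = [t for t in dict.fromkeys(T) if t not in setS]
--     union = set(chain(product(A1, S1), product(A1, T1), product(B1, S1), product(B1, T1)))
--     return (set(product(A1, S1)), union)
-- ===== Notes on version B (the rewrite author's own statement) =====
-- stated objective: alternative
-- what changed: B deduplicates and disjointifies the one-dimensional factors first (distinct A and S, then B minus A and T minus S), so its four products are pairwise disjoint and duplicate-free and the union is their plain disjoint concatenation, whereas A builds four overlapping products and deduplicates at the pair level via set insertion and three set unions.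
import Mathlib
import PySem

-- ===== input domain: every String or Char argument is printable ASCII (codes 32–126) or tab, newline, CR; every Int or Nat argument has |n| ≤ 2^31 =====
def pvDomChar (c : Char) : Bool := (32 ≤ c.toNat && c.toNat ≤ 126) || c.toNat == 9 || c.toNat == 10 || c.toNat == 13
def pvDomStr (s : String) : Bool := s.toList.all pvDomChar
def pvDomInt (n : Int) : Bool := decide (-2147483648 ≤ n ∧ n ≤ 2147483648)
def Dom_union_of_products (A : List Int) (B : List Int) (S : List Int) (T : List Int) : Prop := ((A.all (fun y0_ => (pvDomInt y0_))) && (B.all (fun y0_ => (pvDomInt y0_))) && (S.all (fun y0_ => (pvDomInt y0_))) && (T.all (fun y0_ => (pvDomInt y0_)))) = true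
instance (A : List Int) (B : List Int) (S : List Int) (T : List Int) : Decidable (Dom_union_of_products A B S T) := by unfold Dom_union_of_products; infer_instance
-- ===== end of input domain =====

-- B replaces A's pair-level set deduplication by factor-level deduplication: it disjointifies the
-- one-dimensional factors (distinct A, distinct S, B minus A, T minus S) so its four products are
-- pairwise disjoint and duplicate-free and the union is their plain concatenation (alternative, same cost).

-- ===== PORT A =====
-- itertools.product(X, Y) over two lists, in Python's row-major order (exact for lists)
def pvProd (X Y : List Int) : List (Int × Int) := X.flatMap (fun x => Y.map (fun y => (x, y)))

def union_of_products (A : List Int) (B : List Int) (S : List Int) (T : List Int) : (List (Int × Int)) × (List (Int × Int)) :=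
  let AxS := (pvProd A S).foldl (fun s i => PySem.Set.add s i) PySem.Set.empty
  let AxT := (pvProd A T).foldl (fun s i => PySem.Set.add s i) PySem.Set.empty
  let BxS := (pvProd B S).foldl (fun s i => PySem.Set.add s i) PySem.Set.empty
  let BxT := (pvProd B T).foldl (fun s i => PySem.Set.add s i) PySem.Set.empty
  (AxS, PySem.Set.union (PySem.Set.union (PySem.Set.union AxS AxT) BxS) BxT)


-- ===== PORT B =====
def union_of_products_alt (A : List Int) (B : List Int) (S : List Int) (T : List Int) : (List (Int × Int)) × (List (Int × Int)) :=
  let A1 := PySem.List.dedup A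
  let S1 := PySem.List.dedup S
  let B1 := (PySem.List.dedup B).filter (fun b => !(PySem.Set.contains (PySem.Set.ofList A) b))
  let T1 := (PySem.List.dedup T).filter (fun t => !(PySem.Set.contains (PySem.Set.ofList S) t))
  (PySem.Set.ofList (pvProd A1 S1),
   PySem.Set.ofList (pvProd A1 S1 ++ (pvProd A1 T1 ++ (pvProd B1 S1 ++ pvProd B1 T1))))


-- ===== PRECONDITION & SPEC =====
def Spec_union_of_products (A : List Int) (B : List Int) (S : List Int) (T : List Int) (out : (List (Int × Int)) × (List (Int × Int))) : Prop := out = union_of_products_alt A B S T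
instance (A : List Int) (B : List Int) (S : List Int) (T : List Int) (out : (List (Int × Int)) × (List (Int × Int))) : Decidable (Spec_union_of_products A B S T out) := by unfold Spec_union_of_products; infer_instance

-- ===== CLAIM (what is proved, stated in full; the proofs are below) =====
def Claim_equal_union_of_products : Prop := ∀ (A : List Int) (B : List Int) (S : List Int) (T : List Int), Dom_union_of_products A B S T → Spec_union_of_products A B S T (union_of_products A B S T)

-- ===== LEMMAS AND PROOFS =====
theorem pv_mem_prod (a b : Int) (X Y : List Int) : (a,b) ∈ pvProd X Y ↔ a ∈ X ∧ b ∈ Y := by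
  simp [pvProd]

-- L0
theorem pv_ofList_map (x : Int) (Y : List Int) :
    PySem.Set.ofList (Y.map (fun y => (x,y))) = (PySem.Set.ofList Y).map (fun y => (x,y)) := by
  induction Y using List.reverseRecOn with
  | nil => rfl
  | append_singleton ys y IH =>
    rw [List.map_append, List.map_singleton, PySem.Set.ofList_append_singleton,
        PySem.Set.ofList_append_singleton, IH, PySem.Set.add_eq_ite, PySem.Set.add_eq_ite]
    by_cases hy : y ∈ PySem.Set.ofList ys
    · simp [hy, List.mem_map]
      rwa [PySem.Set.mem_ofList] at hy
    · simp [hy, List.mem_map]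
      rw [PySem.Set.mem_ofList] at hy; exact hy

-- L1
theorem pv_ofList_prod (X Y : List Int) :
    PySem.Set.ofList (pvProd X Y) = pvProd (PySem.Set.ofList X) (PySem.Set.ofList Y) := by
  induction X using List.reverseRecOn with
  | nil => rfl
  | append_singleton xs x IH =>
    have hrow : pvProd (xs ++ [x]) Y = pvProd xs Y ++ Y.map (fun y => (x,y)) := by
      simp [pvProd]
    rw [hrow, PySem.Set.ofList_append, IH, PySem.Set.update_eq_append_filter, pv_ofList_map]
    by_cases hx : x ∈ xs
    · have hx' : x ∈ PySem.Set.ofList xs := by rw [PySem.Set.mem_ofList]; exact hx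
      have : ((PySem.Set.ofList Y).map (fun y => (x,y))).filter
          (fun y => !(PySem.Set.contains (pvProd (PySem.Set.ofList xs) (PySem.Set.ofList Y)) y)) = [] := by
        apply List.filter_eq_nil_iff.mpr
        intro p hp
        simp only [List.mem_map] at hp
        obtain ⟨y, hy, rfl⟩ := hp
        simp [pv_mem_prod, hx', hy]
      rw [this, List.append_nil, PySem.Set.ofList_append_singleton, PySem.Set.add_of_mem hx']
    · have hx' : x ∉ PySem.Set.ofList xs := by rw [PySem.Set.mem_ofList]; exact hx
      have : ((PySem.Set.ofList Y).map (fun y => (x,y))).filter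
          (fun y => !(PySem.Set.contains (pvProd (PySem.Set.ofList xs) (PySem.Set.ofList Y)) y)) =
          (PySem.Set.ofList Y).map (fun y => (x,y)) := by
        apply List.filter_eq_self.mpr
        intro p hp
        simp only [List.mem_map] at hp
        obtain ⟨y, hy, rfl⟩ := hp
        simp [pv_mem_prod, hx']
      rw [this, PySem.Set.ofList_append_singleton, PySem.Set.add_of_not_mem hx']
      simp [pvProd]

-- master: filtering a product row-by-row with a rectangular predicate
theorem pv_filter_prod (X Y : List Int) (q : Int × Int → Bool) (r w : Int → Bool)
    (h : ∀ x ∈ X, ∀ y ∈ Y, q (x,y) = (r x && w y)) :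
    (pvProd X Y).filter q = pvProd (X.filter r) (Y.filter w) := by
  induction X with
  | nil => rfl
  | cons x xs IH =>
    have hrow : pvProd (x :: xs) Y = Y.map (fun y => (x,y)) ++ pvProd xs Y := by
      simp [pvProd]
    rw [hrow, List.filter_append, List.filter_map]
    have hq : (Y.filter (q ∘ fun y => (x,y))) = Y.filter (fun y => r x && w y) := by
      apply List.filter_congr
      intro y hy
      exact h x List.mem_cons_self y hy
    have hIH := IH (fun x hx y hy => h x (List.mem_cons_of_mem _ hx) y hy)
    cases hr : r x with
    | true =>
      have : (x :: xs).filter r = x :: xs.filter r := by simp [hr]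
      rw [this]
      have : pvProd (x :: xs.filter r) (Y.filter w) =
          (Y.filter w).map (fun y => (x,y)) ++ pvProd (xs.filter r) (Y.filter w) := by
        simp [pvProd]
      rw [this, ← hIH, hq]
      simp [hr]
    | false =>
      have : (x :: xs).filter r = xs.filter r := by simp [hr]
      rw [this, ← hIH, hq]
      simp [hr]

-- stage lemma: update s (X×Y) appends the disjointified block
theorem pv_update_prod (s : List (Int × Int)) (X Y : List Int) (r w : Int → Bool)
    (h : ∀ x ∈ X, ∀ y ∈ Y, ((x,y) ∈ s ↔ ¬(r x = true ∧ w y = true))) :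
    PySem.Set.update s (pvProd X Y) =
      s ++ pvProd ((PySem.Set.ofList X).filter r) ((PySem.Set.ofList Y).filter w) := by
  rw [PySem.Set.update_eq_append_filter, pv_ofList_prod]
  congr 1
  apply pv_filter_prod
  intro x hx y hy
  rw [PySem.Set.mem_ofList] at hx hy
  rw [Bool.eq_iff_iff]
  simp [h x hx y hy]


theorem pv_update_ofList (s : PySem.Set (Int × Int)) (ys : List (Int × Int)) :
    PySem.Set.update s (PySem.Set.ofList ys) = PySem.Set.update s ys := by
  rw [PySem.Set.update_eq_append_filter, PySem.Set.update_eq_append_filter, PySem.Set.ofList_ofList]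


theorem pv_main (A B S T : List Int) : union_of_products A B S T = union_of_products_alt A B S T := by
  have hof : ∀ ys : List (Int × Int), List.foldl (fun s i => PySem.Set.add s i) PySem.Set.empty ys = PySem.Set.ofList ys := fun _ => rfl
  have hu : ∀ (s : PySem.Set (Int × Int)) (t : List (Int × Int)), PySem.Set.union s t = PySem.Set.update s t := fun _ _ => rfl
  simp only [union_of_products, union_of_products_alt, hof, hu, pv_update_ofList, PySem.List.dedup_eq_ofList]
  -- abbreviations
  set A1 := PySem.Set.ofList A with hA1
  set S1 := PySem.Set.ofList S with hS1
  set B1 := (PySem.Set.ofList B).filter (fun b => !(PySem.Set.contains (PySem.Set.ofList A) b)) with hB1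
  set T1 := (PySem.Set.ofList T).filter (fun t => !(PySem.Set.contains (PySem.Set.ofList S) t)) with hT1
  have hmB1 : ∀ b : Int, b ∈ B1 ↔ b ∈ B ∧ b ∉ A := by
    intro b
    simp [hB1, List.mem_filter, PySem.Set.mem_ofList]
  have hmT1 : ∀ t : Int, t ∈ T1 ↔ t ∈ T ∧ t ∉ S := by
    intro t
    simp [hT1, List.mem_filter, PySem.Set.mem_ofList]
  have hnA : A1.Nodup := PySem.Set.nodup_ofList A
  have hnS : S1.Nodup := PySem.Set.nodup_ofList S
  have hnB1 : B1.Nodup := (PySem.Set.nodup_ofList B).filter _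
  have hnT1 : T1.Nodup := (PySem.Set.nodup_ofList T).filter _
  have eA : PySem.Set.ofList A1 = A1 := PySem.Set.ofList_eq_self_of_nodup _ hnA
  have eS : PySem.Set.ofList S1 = S1 := PySem.Set.ofList_eq_self_of_nodup _ hnS
  have eB1 : PySem.Set.ofList B1 = B1 := PySem.Set.ofList_eq_self_of_nodup _ hnB1
  have eT1 : PySem.Set.ofList T1 = T1 := PySem.Set.ofList_eq_self_of_nodup _ hnT1
  have e0 : PySem.Set.ofList (pvProd A S) = pvProd A1 S1 := by rw [pv_ofList_prod]
  have e1 : PySem.Set.ofList (pvProd A1 S1) = pvProd A1 S1 := by rw [pv_ofList_prod, eA, eS]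
  -- nodup of blocks
  have hnAT : (pvProd A1 T1).Nodup := hnA.product hnT1
  have hnBS : (pvProd B1 S1).Nodup := hnB1.product hnS
  have hnBT : (pvProd B1 T1).Nodup := hnB1.product hnT1
  -- LHS stages
  have st1 : PySem.Set.update (pvProd A1 S1) (pvProd A T) = pvProd A1 S1 ++ pvProd A1 T1 := by
    rw [pv_update_prod (pvProd A1 S1) A T (fun _ => true)
        (fun t => !(PySem.Set.contains (PySem.Set.ofList S) t))]
    · rw [List.filter_true]
    · intro a ha t ht
      simp [pv_mem_prod, hA1, hS1, PySem.Set.mem_ofList, ha]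
  have st2 : PySem.Set.update (pvProd A1 S1 ++ pvProd A1 T1) (pvProd B S) =
      (pvProd A1 S1 ++ pvProd A1 T1) ++ pvProd B1 S1 := by
    rw [pv_update_prod _ B S (fun b => !(PySem.Set.contains (PySem.Set.ofList A) b)) (fun _ => true)]
    · rw [List.filter_true]
    · intro b hb s hs
      simp only [List.mem_append, pv_mem_prod, hA1, hS1, PySem.Set.mem_ofList, hmT1,
        Bool.not_eq_true']
      constructor
      · rintro (⟨hbA, _⟩ | ⟨hbA, _, hsS⟩) ⟨h1, _⟩ <;>
          simp [PySem.Set.mem_ofList, hbA] at h1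
      · intro h
        by_cases hbA : b ∈ A
        · left; exact ⟨hbA, hs⟩
        · exact absurd ⟨by simp [PySem.Set.mem_ofList, hbA], trivial⟩ h
  have st3 : PySem.Set.update ((pvProd A1 S1 ++ pvProd A1 T1) ++ pvProd B1 S1) (pvProd B T) =
      ((pvProd A1 S1 ++ pvProd A1 T1) ++ pvProd B1 S1) ++ pvProd B1 T1 := by
    rw [pv_update_prod _ B T (fun b => !(PySem.Set.contains (PySem.Set.ofList A) b))
        (fun t => !(PySem.Set.contains (PySem.Set.ofList S) t))]
    intro b hb t ht
    simp only [List.mem_append, pv_mem_prod, hA1, hS1, PySem.Set.mem_ofList, hmT1, hmB1,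
      Bool.not_eq_true']
    constructor
    · rintro ((⟨hbA, htS⟩ | ⟨hbA, _, _⟩) | ⟨⟨_, hbA⟩, htS⟩) ⟨h1, h2⟩
      · simp [PySem.Set.mem_ofList, htS] at h2
      · simp [PySem.Set.mem_ofList, hbA] at h1
      · simp [PySem.Set.mem_ofList, htS] at h2
    · intro h
      by_cases hbA : b ∈ A
      · by_cases htS : t ∈ S
        · exact Or.inl (Or.inl ⟨hbA, htS⟩)
        · exact Or.inl (Or.inr ⟨hbA, ht, htS⟩)
      · by_cases htS : t ∈ S
        · exact Or.inr ⟨⟨hb, hbA⟩, htS⟩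
        · exact absurd ⟨by simp [PySem.Set.mem_ofList, hbA], by simp [PySem.Set.mem_ofList, htS]⟩ h
  -- RHS stages: the blocks are disjoint and duplicate-free, so updates are plain appends
  have st1' : PySem.Set.update (pvProd A1 S1) (pvProd A1 T1) = pvProd A1 S1 ++ pvProd A1 T1 := by
    apply PySem.Set.update_eq_append_of_disjoint _ _ hnAT
    rintro ⟨a, t⟩ hp hq
    rw [pv_mem_prod] at hp hq
    exact ((hmT1 t).mp hp.2).2 (by simpa [hS1, PySem.Set.mem_ofList] using hq.2)
  have st2' : PySem.Set.update (pvProd A1 S1 ++ pvProd A1 T1) (pvProd B1 S1) =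
      (pvProd A1 S1 ++ pvProd A1 T1) ++ pvProd B1 S1 := by
    apply PySem.Set.update_eq_append_of_disjoint _ _ hnBS
    rintro ⟨b, s⟩ hp hq
    rw [pv_mem_prod] at hp
    have hbA : b ∉ A := ((hmB1 b).mp hp.1).2
    rcases List.mem_append.mp hq with hq | hq <;> rw [pv_mem_prod] at hq <;>
      exact hbA (by simpa [hA1, PySem.Set.mem_ofList] using hq.1)
  have st3' : PySem.Set.update ((pvProd A1 S1 ++ pvProd A1 T1) ++ pvProd B1 S1) (pvProd B1 T1) =
      ((pvProd A1 S1 ++ pvProd A1 T1) ++ pvProd B1 S1) ++ pvProd B1 T1 := by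
    apply PySem.Set.update_eq_append_of_disjoint _ _ hnBT
    rintro ⟨b, t⟩ hp hq
    rw [pv_mem_prod] at hp
    have hbA : b ∉ A := ((hmB1 b).mp hp.1).2
    have htS : t ∉ S := ((hmT1 t).mp hp.2).2
    rcases List.mem_append.mp hq with hq | hq
    · rcases List.mem_append.mp hq with hq | hq <;> rw [pv_mem_prod] at hq
      · exact hbA (by simpa [hA1, PySem.Set.mem_ofList] using hq.1)
      · exact hbA (by simpa [hA1, PySem.Set.mem_ofList] using hq.1)
    · rw [pv_mem_prod] at hq
      exact htS (by simpa [hS1, PySem.Set.mem_ofList] using hq.2)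
  rw [PySem.Set.ofList_append, PySem.Set.update_append, PySem.Set.update_append, e0, e1,
      st1, st2, st3, st1', st2', st3']

-- ===== VERDICT (by name: the statement is the Claim_ definition above) =====
theorem union_of_products_spec : Claim_equal_union_of_products := by
  intro A B S T _
  show _ = _
  exact pv_main A B S T
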